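-- pv_equiv track=rewrite | github.com/JasonYuyzy/Codes_and_Cryptography | testing.py | decode_LZW
-- ===== SOURCE A (Python) =====
-- def decode_LZW(symbol_lst, s_width):
--     lst = list()
--     for symbol_group in symbol_lst:
--         symbol = 0
--         for i in range(s_width):
--             symbol += symbol_group[i]*(255**i)
--         lst.append(symbol)
--     return lst
-- ===== SOURCE B (Python) =====
-- def decode_LZW(symbol_lst, s_width):
--     def value(digits, w):
--         # first w digits, least-significant first: recursion on the list structure
--         if w <= 0:
--             return 0
--         return digits[0] + 255 * value(digits[1:], w - 1)
--     return [value(group, s_width) for group in symbol_lst]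
-- ===== Notes on version B (the rewrite author's own statement) =====
-- stated objective: alternative
-- what changed: Replaces the indexed power-sum loop by a recursive decomposition: a helper recurses on the digit list (head plus tail) with a width counter, combining as digit + 255*rest, and a list comprehension replaces the accumulator loop; no indices, no range, no exponentiation.
import Mathlib
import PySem

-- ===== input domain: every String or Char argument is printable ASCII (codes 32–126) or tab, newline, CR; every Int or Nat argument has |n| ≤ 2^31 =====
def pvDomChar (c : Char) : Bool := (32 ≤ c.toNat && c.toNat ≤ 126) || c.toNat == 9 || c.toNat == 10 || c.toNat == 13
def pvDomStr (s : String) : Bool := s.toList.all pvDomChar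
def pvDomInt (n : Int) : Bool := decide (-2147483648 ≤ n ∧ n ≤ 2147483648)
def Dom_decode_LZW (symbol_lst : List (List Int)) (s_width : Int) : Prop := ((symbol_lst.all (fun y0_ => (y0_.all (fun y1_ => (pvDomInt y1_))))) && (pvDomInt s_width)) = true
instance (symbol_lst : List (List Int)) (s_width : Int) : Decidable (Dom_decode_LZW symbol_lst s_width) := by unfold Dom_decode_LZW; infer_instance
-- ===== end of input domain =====

-- B replaces A's indexed digit·255**i power-sum loop by structural recursion on each digit
-- list (digit + 255·rest of the tail) with a width counter: no indices, no exponentiation.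

-- ===== PORT A =====
def decode_LZW (symbol_lst : List (List Int)) (s_width : Int) : List Int :=
  symbol_lst.foldl (fun lst symbol_group =>
    lst ++ [(PySem.List.pyRange 0 s_width 1).foldl
      (fun symbol i => symbol + PySem.List.pyGetD symbol_group i 0 * 255 ^ i.toNat) 0]) []

-- ===== PORT B =====
-- helper 'value' of Source B: digits[1:] on a list is exactly List.drop 1; digits[0] is pyGetD _ 0
def pvValue (digits : List Int) (w : Int) : Int :=
  if w ≤ 0 then 0
  else PySem.List.pyGetD digits 0 0 + 255 * pvValue (digits.drop 1) (w - 1)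
termination_by w.toNat
decreasing_by omega

def decode_LZW_alt (symbol_lst : List (List Int)) (s_width : Int) : List Int :=
  symbol_lst.map (fun group => pvValue group s_width)

-- ===== PRECONDITION & SPEC =====
-- Pre_ excludes exactly the inputs where Python A raises IndexError: some group shorter than a
-- positive s_width (B raises there too; the ports use a 0 default instead).
def Pre_decode_LZW (symbol_lst : List (List Int)) (s_width : Int) : Prop :=
  ∀ g ∈ symbol_lst, s_width ≤ (g.length : Int)
instance (symbol_lst : List (List Int)) (s_width : Int) : Decidable (Pre_decode_LZW symbol_lst s_width) := by unfold Pre_decode_LZW; infer_instance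
def pvWitness_decode_LZW : List (List Int) × Int := ([[1, 2], [255, 0]], 2)

def Spec_decode_LZW (symbol_lst : List (List Int)) (s_width : Int) (out : List Int) : Prop := out = decode_LZW_alt symbol_lst s_width
instance (symbol_lst : List (List Int)) (s_width : Int) (out : List Int) : Decidable (Spec_decode_LZW symbol_lst s_width out) := by unfold Spec_decode_LZW; infer_instance

-- ===== CLAIM =====
def Claim_equal_decode_LZW : Prop := ∀ (symbol_lst : List (List Int)) (s_width : Int), Dom_decode_LZW symbol_lst s_width → Pre_decode_LZW symbol_lst s_width → Spec_decode_LZW symbol_lst s_width (decode_LZW symbol_lst s_width)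

-- ===== LEMMAS AND PROOFS =====

-- A's inner loop equals the closed power sum.
theorem powersum_foldl (g : List Int) : ∀ (n : Nat),
    (PySem.List.pyRange 0 (n : Int) 1).foldl
        (fun symbol i => symbol + PySem.List.pyGetD g i 0 * 255 ^ i.toNat) 0
      = ∑ i ∈ Finset.range n, PySem.List.pyGetD g (i : Int) 0 * 255 ^ i := by
  intro n
  induction n with
  | zero => simp [PySem.List.pyRange_one_eq_nil]
  | succ n ih =>
    have hsplit : PySem.List.pyRange 0 (((n : Nat) + 1 : Int)) 1
        = PySem.List.pyRange 0 (n : Int) 1 ++ [(n : Int)] := by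
      simpa using PySem.List.pyRange_one_succ_right (a := 0) (b := (n : Int)) (by positivity)
    push_cast
    rw [hsplit, List.foldl_append, ih, Finset.sum_range_succ]
    simp

-- B's recursion equals the same closed power sum.
theorem pvValue_eq_powersum : ∀ (n : Nat) (g : List Int),
    pvValue g (n : Int)
      = ∑ i ∈ Finset.range n, PySem.List.pyGetD g (i : Int) 0 * 255 ^ i := by
  intro n
  induction n with
  | zero => intro g; simp [pvValue]
  | succ n ih =>
    intro g
    rw [pvValue]
    rw [if_neg (by push_cast; omega)]
    have hcast : ((((n : Nat) + 1 : Nat) : Int)) - 1 = (n : Int) := by push_cast; ring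
    rw [hcast, ih]
    rw [Finset.sum_range_succ', Finset.mul_sum]
    have hdrop : ∀ i ∈ Finset.range n,
        255 * (PySem.List.pyGetD (g.drop 1) (i : Int) 0 * 255 ^ i)
          = PySem.List.pyGetD g ((i + 1 : Nat) : Int) 0 * 255 ^ (i + 1) := by
      intro i _
      have h1 : PySem.List.pyGetD (g.drop 1) (i : Int) 0
          = PySem.List.pyGetD g ((i + 1 : Nat) : Int) 0 := by
        rw [PySem.List.pyGetD_natCast, PySem.List.pyGetD_natCast]
        simp [List.getD_eq_getElem?_getD]
      rw [h1]; ring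
    rw [Finset.sum_congr rfl hdrop]
    simp [add_comm]

-- per-group equality
theorem group_eq (g : List Int) (s_width : Int) :
    (PySem.List.pyRange 0 s_width 1).foldl
        (fun symbol i => symbol + PySem.List.pyGetD g i 0 * 255 ^ i.toNat) 0
      = pvValue g s_width := by
  by_cases h : s_width ≤ 0
  · rw [PySem.List.pyRange_one_eq_nil h, pvValue, if_pos h]; simp
  · have hs : s_width = ((s_width.toNat : Nat) : Int) := by omega
    rw [hs, powersum_foldl, pvValue_eq_powersum]

-- A's accumulator-append loop is a map
theorem foldl_append_map (f : List Int → Int) : ∀ (l : List (List Int)) (acc : List Int),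
    l.foldl (fun lst g => lst ++ [f g]) acc = acc ++ l.map f := by
  intro l
  induction l with
  | nil => intro acc; simp
  | cons x xs ih => intro acc; simp [ih]

-- ===== VERDICT =====
theorem decode_LZW_spec : Claim_equal_decode_LZW := by
  intro symbol_lst s_width _ _
  unfold Spec_decode_LZW decode_LZW decode_LZW_alt
  rw [foldl_append_map]
  simp only [List.nil_append]
  apply List.map_congr_left
  intro g _
  exact group_eq g s_width
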